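-- pv_equiv track=rewrite | github.com/mikooo777/dataplane | app/guards/semantic_firewall.py | _has_dangerous_intent
-- ===== SOURCE A (Python) =====
-- _INTENT_WINDOW = 50
--
-- _EXTRACTION_SIGNALS = [
--     # Direct requests
--     "give me", "show me", "send me", "hand over",
--     # Possessive extraction
--     "tell me the", "tell me your", "tell me our",
--     "what is your", "what is our", "what's your", "what's our",
--     "what are your", "what are our",
--     "share your", "share our",
--     "provide your", "provide our",
--     # Specific extraction verbs
--     "reveal", "disclose", "leak", "exfiltrate", "expose the",
--     "steal", "harvest", "scrape",
--     # Access patterns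
--     "list all", "list your", "list our",
--     "access your", "access our", "access the",
--     "download the", "download our",
--     "get your", "get our",
--     "obtain the", "obtain your", "obtain our",
--     "i need the", "i want the", "i need your", "i want your",
--     "dump the", "dump your", "dump our",
--     "extract the", "extract your", "extract our",
--     "fetch the", "fetch your",
--     "get me the", "get me your",
-- ]
--
-- _CREATION_SIGNALS = [
--     "write a", "write me", "write code for",
--     "create a", "create me",
--     "build a", "build me",
--     "make a", "make me",
--     "generate a", "generate me",
--     "code for a", "code for the",
--     "script for", "program for",
--     "implement a", "develop a",
--     "help me write", "help me create", "help me build", "help me make",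
--     "how to write a", "how to create a", "how to build a",
-- ]
--
-- def _has_dangerous_intent(text: str, topic: str, category: str) -> bool:
--     """
--     Check if the text shows extraction or creation intent near the topic.
--
--     Uses a proximity window: the intent signal must appear within
--     _INTENT_WINDOW characters BEFORE the topic keyword. This avoids
--     false positives where an extraction word appears in a completely
--     different part of a long prompt.
--     """
--     # Find all occurrences of the topic and check each
--     start = 0
--     while True:
--         topic_idx = text.find(topic, start)
--         if topic_idx == -1:
--             break
--
--         # Get the text window before this occurrence
--         window_start = max(0, topic_idx - _INTENT_WINDOW)
--         prefix = text[window_start:topic_idx]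
--
--         # Check extraction signals
--         for signal in _EXTRACTION_SIGNALS:
--             if signal in prefix:
--                 return True
--
--         # For malware category, also check creation signals
--         if category == "malware":
--             for signal in _CREATION_SIGNALS:
--                 if signal in prefix:
--                     return True
--
--         start = topic_idx + 1
--
--     return False
-- ===== SOURCE B (Python) =====
-- _INTENT_WINDOW = 50
--
-- # Signals stored compactly as pipe-separated strings (none contains '|').
-- _EXTRACTION = ("give me|show me|send me|hand over|"
--                "tell me the|tell me your|tell me our|"
--                "what is your|what is our|what's your|what's our|"
--                "what are your|what are our|"
--                "share your|share our|provide your|provide our|"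
--                "reveal|disclose|leak|exfiltrate|expose the|"
--                "steal|harvest|scrape|"
--                "list all|list your|list our|"
--                "access your|access our|access the|"
--                "download the|download our|get your|get our|"
--                "obtain the|obtain your|obtain our|"
--                "i need the|i want the|i need your|i want your|"
--                "dump the|dump your|dump our|"
--                "extract the|extract your|extract our|"
--                "fetch the|fetch your|get me the|get me your")
--
-- _CREATION = ("write a|write me|write code for|"
--              "create a|create me|build a|build me|"
--              "make a|make me|generate a|generate me|"
--              "code for a|code for the|script for|program for|"
--              "implement a|develop a|"
--              "help me write|help me create|help me build|help me make|"
--              "how to write a|how to create a|how to build a")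
--
--
-- def _has_dangerous_intent(text: str, topic: str, category: str) -> bool:
--     # Signal-major search: a signal occurrence at index i sits entirely inside
--     # the 50-char window before some topic occurrence t exactly when the first
--     # topic occurrence at or after i + len(signal) satisfies t <= i + 50.
--     active = _EXTRACTION.split("|")
--     if category == "malware":
--         active += _CREATION.split("|")
--     for sig in active:
--         pos = 0
--         while True:
--             i = text.find(sig, pos)
--             if i == -1:
--                 break
--             t = text.find(topic, i + len(sig))
--             if t != -1 and t <= i + _INTENT_WINDOW:
--                 return True
--             pos = i + 1
--     return False
-- ===== Notes on version B (the rewrite author's own statement) =====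
-- stated objective: alternative
-- what changed: B inverts the search: instead of scanning every topic occurrence and substring-testing each signal against the 50-char prefix window, it keeps the signal table as pipe-separated strings split at call time and walks each signal's occurrences with text.find(signal, pos), firing when the first topic occurrence after the signal lies within signal_index + 50.
import Mathlib
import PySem

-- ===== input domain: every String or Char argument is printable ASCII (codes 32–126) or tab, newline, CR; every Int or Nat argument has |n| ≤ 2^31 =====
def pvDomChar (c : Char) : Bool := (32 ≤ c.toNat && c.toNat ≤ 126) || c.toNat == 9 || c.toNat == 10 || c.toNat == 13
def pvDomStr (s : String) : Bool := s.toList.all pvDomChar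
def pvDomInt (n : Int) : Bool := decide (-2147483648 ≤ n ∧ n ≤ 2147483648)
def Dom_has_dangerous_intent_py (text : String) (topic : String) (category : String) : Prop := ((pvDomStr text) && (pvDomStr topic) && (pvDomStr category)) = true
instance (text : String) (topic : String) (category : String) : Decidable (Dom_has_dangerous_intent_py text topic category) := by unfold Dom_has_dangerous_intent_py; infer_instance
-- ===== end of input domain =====

-- B replaces A's topic-occurrence scan over 50-char prefix windows by a
-- signal-major search (first topic occurrence after each signal occurrence),
-- with the signal table kept as pipe-separated strings split at call time.

-- ===== PORT A =====

def pvIntentWindow : Int := 50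

def pvExtractionSignals : List (List Char) :=
  ["give me".toList, "show me".toList, "send me".toList, "hand over".toList,
   "tell me the".toList, "tell me your".toList, "tell me our".toList,
   "what is your".toList, "what is our".toList, "what's your".toList, "what's our".toList,
   "what are your".toList, "what are our".toList,
   "share your".toList, "share our".toList,
   "provide your".toList, "provide our".toList,
   "reveal".toList, "disclose".toList, "leak".toList, "exfiltrate".toList, "expose the".toList,
   "steal".toList, "harvest".toList, "scrape".toList,
   "list all".toList, "list your".toList, "list our".toList,
   "access your".toList, "access our".toList, "access the".toList,
   "download the".toList, "download our".toList,
   "get your".toList, "get our".toList,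
   "obtain the".toList, "obtain your".toList, "obtain our".toList,
   "i need the".toList, "i want the".toList, "i need your".toList, "i want your".toList,
   "dump the".toList, "dump your".toList, "dump our".toList,
   "extract the".toList, "extract your".toList, "extract our".toList,
   "fetch the".toList, "fetch your".toList,
   "get me the".toList, "get me your".toList]

def pvCreationSignals : List (List Char) :=
  ["write a".toList, "write me".toList, "write code for".toList,
   "create a".toList, "create me".toList,
   "build a".toList, "build me".toList,
   "make a".toList, "make me".toList,
   "generate a".toList, "generate me".toList,
   "code for a".toList, "code for the".toList,
   "script for".toList, "program for".toList,
   "implement a".toList, "develop a".toList,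
   "help me write".toList, "help me create".toList, "help me build".toList, "help me make".toList,
   "how to write a".toList, "how to create a".toList, "how to build a".toList]

-- A's while-loop over topic occurrences, with fuel for termination (the fuel
-- supplied below always suffices, since `start` strictly increases).
def pvALoop (txt topic : List Char) (category : List Char) : Nat → Nat → Bool
  | 0, _ => false
  | fuel + 1, start =>
    let topicIdx := PySem.Chars.findFrom txt topic (start : Int) none
    if topicIdx = -1 then false
    else
      let windowStart := max 0 (topicIdx - pvIntentWindow)
      let pfx := PySem.Chars.slice txt (some windowStart) (some topicIdx)
      if pvExtractionSignals.any (fun signal => PySem.Chars.isIn signal pfx) then true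
      else if category = "malware".toList ∧
              pvCreationSignals.any (fun signal => PySem.Chars.isIn signal pfx) then true
      else pvALoop txt topic category fuel (topicIdx.toNat + 1)

def has_dangerous_intent_py (text : String) (topic : String) (category : String) : Bool :=
  pvALoop text.toList topic.toList category.toList (text.toList.length + 2) 0

-- ===== PORT B =====

-- Source B keeps the signal tables as single pipe-separated strings.
def pvExtractionPacked : String :=
  "give me|show me|send me|hand over|tell me the|tell me your|tell me our|what is your|what is our|what's your|what's our|what are your|what are our|share your|share our|provide your|provide our|reveal|disclose|leak|exfiltrate|expose the|steal|harvest|scrape|list all|list your|list our|access your|access our|access the|download the|download our|get your|get our|obtain the|obtain your|obtain our|i need the|i want the|i need your|i want your|dump the|dump your|dump our|extract the|extract your|extract our|fetch the|fetch your|get me the|get me your"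

def pvCreationPacked : String :=
  "write a|write me|write code for|create a|create me|build a|build me|make a|make me|generate a|generate me|code for a|code for the|script for|program for|implement a|develop a|help me write|help me create|help me build|help me make|how to write a|how to create a|how to build a"

-- Source B's inner while-loop: every occurrence of one signal via text.find(sig, pos),
-- succeeding when the first topic occurrence after it lands within 50 chars.
def pvScanSig (txt topic sig : List Char) : Nat → Nat → Bool
  | 0, _ => false
  | fuel + 1, pos =>
    let i := PySem.Chars.findFrom txt sig (pos : Int) none
    if i = -1 then false
    else
      let t := PySem.Chars.findFrom txt topic (i + sig.length) none
      if t ≠ -1 ∧ t ≤ i + pvIntentWindow then true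
      else pvScanSig txt topic sig fuel (i.toNat + 1)

def has_dangerous_intent_py_alt (text : String) (topic : String) (category : String) : Bool :=
  let base := PySem.Chars.splitOn pvExtractionPacked.toList "|".toList
  let active := if category = "malware"
                then base ++ PySem.Chars.splitOn pvCreationPacked.toList "|".toList
                else base
  active.any (fun sig => pvScanSig text.toList topic.toList sig (text.toList.length + 1) 0)

-- ===== PRECONDITION & SPEC =====
def Spec_has_dangerous_intent_py (text : String) (topic : String) (category : String) (out : Bool) : Prop := out = has_dangerous_intent_py_alt text topic category
instance (text : String) (topic : String) (category : String) (out : Bool) : Decidable (Spec_has_dangerous_intent_py text topic category out) := by unfold Spec_has_dangerous_intent_py; infer_instance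

-- ===== CLAIM (what is proved, stated in full; the proofs are below) =====
def Claim_equal_has_dangerous_intent_py : Prop := ∀ (text : String) (topic : String) (category : String), Dom_has_dangerous_intent_py text topic category → Spec_has_dangerous_intent_py text topic category (has_dangerous_intent_py text topic category)


-- ===== LEMMAS AND PROOFS =====

-- The packed tables split into exactly A's signal lists.
set_option maxRecDepth 20000 in
set_option maxHeartbeats 2000000 in
theorem pvSplit_extraction :
    PySem.Chars.splitOn pvExtractionPacked.toList "|".toList = pvExtractionSignals := by decide

set_option maxRecDepth 20000 in
set_option maxHeartbeats 2000000 in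
theorem pvSplit_creation :
    PySem.Chars.splitOn pvCreationPacked.toList "|".toList = pvCreationSignals := by decide

-- Every signal is nonempty and at most 50 characters long.
theorem pvSigs_facts : ∀ s ∈ pvExtractionSignals ++ pvCreationSignals, s ≠ [] ∧ s.length ≤ 50 := by decide

-- The active signal list (proof-side name for what both programs consult).
def pvActive (cat : List Char) : List (List Char) :=
  if cat = "malware".toList then pvExtractionSignals ++ pvCreationSignals else pvExtractionSignals

theorem pvActive_facts : ∀ cat, ∀ s ∈ pvActive cat, s ≠ [] ∧ s.length ≤ 50 := by
  intro cat s hs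
  unfold pvActive at hs
  split at hs
  · exact pvSigs_facts s hs
  · exact pvSigs_facts s (List.mem_append_left _ hs)

-- An occurrence of a nonempty pattern fits inside the text.
theorem pvOcc_bound {txt sub : List Char} {i : Nat} (hne : sub ≠ []) (h : sub <+: txt.drop i) :
    i + sub.length ≤ txt.length := by
  have hl := h.length_le
  rw [List.length_drop] at hl
  have h0 : sub.length ≠ 0 := fun hz => hne (List.length_eq_zero_iff.mp hz)
  omega

-- text.find(sub, k) for k past the end is -1 (CPython rule, kept by PySem).
theorem pvFindFrom_past {s sub : List Char} {k : Nat} (hk : s.length < k) :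
    PySem.Chars.findFrom s sub (k : Int) none = -1 := by
  unfold PySem.Chars.findFrom
  simp only []
  split_ifs with h1 h2 <;> omega

-- Infix of a suffix = an occurrence at some index ≥ k.
theorem pvInfix_drop_iff (txt sub : List Char) (k : Nat) :
    sub <:+: txt.drop k ↔ ∃ i, k ≤ i ∧ sub <+: txt.drop i := by
  rw [← PySem.Chars.isIn_iff_infix, ← PySem.Chars.exists_prefix_drop_iff_isIn]
  constructor
  · rintro ⟨j, hj⟩
    rw [List.drop_drop] at hj
    exact ⟨k + j, by omega, hj⟩
  · rintro ⟨i, hki, hi⟩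
    refine ⟨i - k, ?_⟩
    rw [List.drop_drop, show k + (i - k) = i from by omega]
    exact hi

-- text.find(sub, k) = -1 means: no occurrence at or after k.
theorem pvFindFrom_neg {txt sub : List Char} {k : Nat} (hk : k ≤ txt.length)
    (h : PySem.Chars.findFrom txt sub (k : Int) none = -1) :
    ∀ i, k ≤ i → ¬ sub <+: txt.drop i := by
  have hni := (PySem.Chars.findFrom_natCast_eq_neg_one_iff txt sub k hk).mp h
  rw [pvInfix_drop_iff] at hni
  intro i hki hocc
  exact hni ⟨i, hki, hocc⟩

-- text.find(sub, k) ≥ 0 is the FIRST occurrence at or after k.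
theorem pvFindFrom_pos {txt sub : List Char} {k : Nat} (hk : k ≤ txt.length)
    (h : PySem.Chars.findFrom txt sub (k : Int) none ≠ -1) :
    ∃ r : Nat, PySem.Chars.findFrom txt sub (k : Int) none = (r : Int) ∧ k ≤ r ∧ r ≤ txt.length ∧
      sub <+: txt.drop r ∧ ∀ i, k ≤ i → i < r → ¬ sub <+: txt.drop i := by
  obtain ⟨h1, h2, h3⟩ := PySem.Chars.findFrom_natCast_spec txt sub k hk h
  have hle : PySem.Chars.findFrom txt sub (k : Int) none ≤ (txt.length : Int) := by
    rw [PySem.Chars.findFrom_natCast txt sub k hk]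
    split_ifs with hf
    · omega
    · have hfl := PySem.Chars.find_le_length (txt.drop k) sub
      rw [List.length_drop] at hfl
      omega
  exact ⟨(PySem.Chars.findFrom txt sub (k : Int) none).toNat, by omega, by omega, by omega, h2, h3⟩

-- The signal test on the 50-char window text[max(0,t-50):t], as occurrences.
theorem pvWindow_iff {txt : List Char} (t : Nat) {s : List Char} (hs : s ≠ []) :
    PySem.Chars.isIn s (PySem.Chars.slice txt (some (max 0 ((t : Int) - pvIntentWindow))) (some (t : Int))) = true
    ↔ ∃ i, t ≤ i + 50 ∧ i + s.length ≤ t ∧ s <+: txt.drop i := by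
  have hmax : max 0 ((t : Int) - pvIntentWindow) = ((t - 50 : Nat) : Int) := by
    unfold pvIntentWindow; omega
  rw [hmax, PySem.Chars.slice_eq_listSlice, PySem.List.slice_natCast,
      ← PySem.Chars.exists_prefix_drop_iff_isIn]
  have h0 : s.length ≠ 0 := fun hz => hs (List.length_eq_zero_iff.mp hz)
  constructor
  · rintro ⟨j, hj⟩
    rw [List.drop_take, List.drop_drop] at hj
    obtain ⟨hp, hlen⟩ := List.prefix_take_iff.mp hj
    exact ⟨t - 50 + j, by omega, by omega, hp⟩
  · rintro ⟨i, h1, h2, h3⟩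
    refine ⟨i - (t - 50), ?_⟩
    rw [List.drop_take, List.drop_drop, show t - 50 + (i - (t - 50)) = i from by omega]
    exact List.prefix_take_iff.mpr ⟨h3, by omega⟩

-- What one iteration of A's loop tests at topic occurrence t.
def pvHitProp (txt cat : List Char) (t : Nat) : Prop :=
  ∃ s ∈ pvActive cat, ∃ i, t ≤ i + 50 ∧ i + s.length ≤ t ∧ s <+: txt.drop i

theorem pvBody_iff {txt : List Char} (cat : List Char) (t : Nat) :
    (pvExtractionSignals.any (fun signal => PySem.Chars.isIn signal
        (PySem.Chars.slice txt (some (max 0 ((t : Int) - pvIntentWindow))) (some (t : Int)))) = true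
     ∨ (cat = "malware".toList ∧ pvCreationSignals.any (fun signal => PySem.Chars.isIn signal
        (PySem.Chars.slice txt (some (max 0 ((t : Int) - pvIntentWindow))) (some (t : Int)))) = true))
    ↔ pvHitProp txt cat t := by
  unfold pvHitProp pvActive
  by_cases hc : cat = "malware".toList
  · rw [if_pos hc]
    simp only [List.any_eq_true]
    constructor
    · rintro (⟨s, hs, hw⟩ | ⟨-, s, hs, hw⟩)
      · exact ⟨s, List.mem_append_left _ hs,
          (pvWindow_iff t (pvSigs_facts s (List.mem_append_left _ hs)).1).mp hw⟩
      · exact ⟨s, List.mem_append_right _ hs,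
          (pvWindow_iff t (pvSigs_facts s (List.mem_append_right _ hs)).1).mp hw⟩
    · rintro ⟨s, hs, hw⟩
      rcases List.mem_append.mp hs with hs' | hs'
      · exact Or.inl ⟨s, hs', (pvWindow_iff t (pvSigs_facts s hs).1).mpr hw⟩
      · exact Or.inr ⟨hc, s, hs', (pvWindow_iff t (pvSigs_facts s hs).1).mpr hw⟩
  · rw [if_neg hc]
    simp only [List.any_eq_true]
    constructor
    · rintro (⟨s, hs, hw⟩ | ⟨hcc, -⟩)
      · exact ⟨s, hs, (pvWindow_iff t (pvSigs_facts s (List.mem_append_left _ hs)).1).mp hw⟩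
      · exact absurd hcc hc
    · rintro ⟨s, hs, hw⟩
      exact Or.inl ⟨s, hs, (pvWindow_iff t (pvSigs_facts s (List.mem_append_left _ hs)).1).mpr hw⟩

-- Unfolding equation for A's loop (the let-bindings substituted; definitional).
theorem pvALoop_succ (txt topic cat : List Char) (fuel start : Nat) :
    pvALoop txt topic cat (fuel + 1) start =
      (if PySem.Chars.findFrom txt topic (start : Int) none = -1 then false
       else if pvExtractionSignals.any (fun signal => PySem.Chars.isIn signal
           (PySem.Chars.slice txt (some (max 0 (PySem.Chars.findFrom txt topic (start : Int) none - pvIntentWindow))) (some (PySem.Chars.findFrom txt topic (start : Int) none)))) = true then true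
       else if cat = "malware".toList ∧ pvCreationSignals.any (fun signal => PySem.Chars.isIn signal
           (PySem.Chars.slice txt (some (max 0 (PySem.Chars.findFrom txt topic (start : Int) none - pvIntentWindow))) (some (PySem.Chars.findFrom txt topic (start : Int) none)))) = true then true
       else pvALoop txt topic cat fuel ((PySem.Chars.findFrom txt topic (start : Int) none).toNat + 1)) := rfl

-- A's loop returns true iff some topic occurrence ≥ start has a signal in its window.
theorem pvALoop_iff (txt topic cat : List Char) :
    ∀ fuel start, txt.length + 1 ≤ fuel + start →
    (pvALoop txt topic cat fuel start = true ↔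
      ∃ t, start ≤ t ∧ t ≤ txt.length ∧ topic <+: txt.drop t ∧ pvHitProp txt cat t) := by
  intro fuel
  induction fuel with
  | zero =>
    intro start h2
    simp only [pvALoop]
    refine iff_of_false (by simp) ?_
    rintro ⟨t, ht1, ht2, -, -⟩
    omega
  | succ fuel ih =>
    intro start h2
    by_cases hstart : start ≤ txt.length
    · by_cases hff : PySem.Chars.findFrom txt topic (start : Int) none = -1
      · rw [pvALoop_succ, if_pos hff]
        refine iff_of_false (by simp) ?_
        rintro ⟨t, ht1, ht2, hocc, -⟩
        exact pvFindFrom_neg hstart hff t ht1 hocc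
      · obtain ⟨r, hreq, hsr, hrl, hocc, hmin⟩ := pvFindFrom_pos hstart hff
        rw [pvALoop_succ, hreq, if_neg (by omega : ¬ ((r : Int) = -1))]
        by_cases hb1 : pvExtractionSignals.any (fun signal => PySem.Chars.isIn signal
            (PySem.Chars.slice txt (some (max 0 ((r : Int) - pvIntentWindow))) (some (r : Int)))) = true
        · rw [if_pos hb1]
          exact iff_of_true rfl ⟨r, hsr, hrl, hocc, (pvBody_iff cat r).mp (Or.inl hb1)⟩
        · rw [if_neg hb1]
          by_cases hb2 : cat = "malware".toList ∧ pvCreationSignals.any (fun signal => PySem.Chars.isIn signal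
              (PySem.Chars.slice txt (some (max 0 ((r : Int) - pvIntentWindow))) (some (r : Int)))) = true
          · rw [if_pos hb2]
            exact iff_of_true rfl ⟨r, hsr, hrl, hocc, (pvBody_iff cat r).mp (Or.inr hb2)⟩
          · rw [if_neg hb2, show ((r : Int)).toNat = r from by omega,
                ih (r + 1) (by omega)]
            have hnohit : ¬ pvHitProp txt cat r := fun hh => by
              rcases (pvBody_iff cat r).mpr hh with h | h
              · exact hb1 h
              · exact hb2 h
            constructor
            · rintro ⟨t, ht1, htl, ho, hh⟩
              exact ⟨t, by omega, htl, ho, hh⟩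
            · rintro ⟨t, ht1, htl, ho, hh⟩
              refine ⟨t, ?_, htl, ho, hh⟩
              by_contra hge
              push Not at hge
              rcases eq_or_lt_of_le (by omega : t ≤ r) with heq2 | hlt2
              · exact hnohit (heq2 ▸ hh)
              · exact hmin t ht1 hlt2 ho
    · rw [pvALoop_succ, if_pos (pvFindFrom_past (by omega))]
      refine iff_of_false (by simp) ?_
      rintro ⟨t, ht1, ht2, -, -⟩
      omega

-- Unfolding equation for B's inner loop (definitional).
theorem pvScanSig_succ (txt topic sig : List Char) (fuel pos : Nat) :
    pvScanSig txt topic sig (fuel + 1) pos =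
      (if PySem.Chars.findFrom txt sig (pos : Int) none = -1 then false
       else if PySem.Chars.findFrom txt topic (PySem.Chars.findFrom txt sig (pos : Int) none + (sig.length : Int)) none ≠ -1 ∧
               PySem.Chars.findFrom txt topic (PySem.Chars.findFrom txt sig (pos : Int) none + (sig.length : Int)) none ≤ PySem.Chars.findFrom txt sig (pos : Int) none + pvIntentWindow then true
       else pvScanSig txt topic sig fuel ((PySem.Chars.findFrom txt sig (pos : Int) none).toNat + 1)) := rfl

-- B's per-signal loop returns true iff some occurrence of the signal at or
-- after pos has a topic occurrence inside its forward window.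
theorem pvScanSig_iff (txt topic : List Char) {s : List Char} (hsne : s ≠ []) :
    ∀ fuel pos, txt.length + 1 ≤ fuel + pos →
    (pvScanSig txt topic s fuel pos = true ↔
      ∃ i, pos ≤ i ∧ s <+: txt.drop i ∧
        ∃ t, i + s.length ≤ t ∧ t ≤ i + 50 ∧ t ≤ txt.length ∧ topic <+: txt.drop t) := by
  intro fuel
  induction fuel with
  | zero =>
    intro pos h2
    simp only [pvScanSig]
    refine iff_of_false (by simp) ?_
    rintro ⟨i, hi1, hiocc, -⟩
    have := pvOcc_bound hsne hiocc
    have h0 : s.length ≠ 0 := fun hz => hsne (List.length_eq_zero_iff.mp hz)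
    omega
  | succ fuel ih =>
    intro pos h2
    by_cases hpos : pos ≤ txt.length
    · by_cases hff : PySem.Chars.findFrom txt s (pos : Int) none = -1
      · rw [pvScanSig_succ, if_pos hff]
        refine iff_of_false (by simp) ?_
        rintro ⟨i, hi1, hiocc, -⟩
        exact pvFindFrom_neg hpos hff i hi1 hiocc
      · obtain ⟨r, hreq, hpr, hrl, hocc, hmin⟩ := pvFindFrom_pos hpos hff
        have h0 : s.length ≠ 0 := fun hz => hsne (List.length_eq_zero_iff.mp hz)
        have hrb : r + s.length ≤ txt.length := pvOcc_bound hsne hocc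
        rw [pvScanSig_succ, hreq, if_neg (by omega : ¬ ((r : Int) = -1))]
        rw [show ((r : Int) + (s.length : Int)) = ((r + s.length : Nat) : Int) from by push_cast; ring]
        by_cases hcond : PySem.Chars.findFrom txt topic ((r + s.length : Nat) : Int) none ≠ -1 ∧
            PySem.Chars.findFrom txt topic ((r + s.length : Nat) : Int) none ≤ (r : Int) + pvIntentWindow
        · rw [if_pos hcond]
          obtain ⟨hne1, hle1⟩ := hcond
          obtain ⟨u, hueq, hku, hul, huocc, -⟩ := pvFindFrom_pos (by omega) hne1
          refine iff_of_true rfl ⟨r, hpr, hocc, u, hku, ?_, hul, huocc⟩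
          rw [hueq] at hle1
          unfold pvIntentWindow at hle1
          omega
        · rw [if_neg hcond, show ((r : Int)).toNat = r from by omega, ih (r + 1) (by omega)]
          constructor
          · rintro ⟨i, hi1, hiocc, rest⟩
            exact ⟨i, by omega, hiocc, rest⟩
          · rintro ⟨i, hi1, hiocc, u, hu1, hu2, hu3, huocc⟩
            refine ⟨i, ?_, hiocc, u, hu1, hu2, hu3, huocc⟩
            by_contra hge
            push Not at hge
            rcases eq_or_lt_of_le (by omega : i ≤ r) with heq2 | hlt2
            · subst heq2
              apply hcond
              have hnn : PySem.Chars.findFrom txt topic ((i + s.length : Nat) : Int) none ≠ -1 := by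
                intro hz
                exact pvFindFrom_neg (by omega) hz u hu1 huocc
              obtain ⟨v, hveq, hkv, hvl, hvocc, hvmin⟩ := pvFindFrom_pos (by omega) hnn
              have hvu : v ≤ u := by
                by_contra hvu
                push Not at hvu
                exact hvmin u hu1 hvu huocc
              refine ⟨hnn, ?_⟩
              rw [hveq]
              unfold pvIntentWindow
              omega
            · exact absurd hiocc (hmin i hi1 hlt2)
    · rw [pvScanSig_succ, if_pos (pvFindFrom_past (by omega))]
      refine iff_of_false (by simp) ?_
      rintro ⟨i, hi1, hiocc, -⟩
      have := pvOcc_bound hsne hiocc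
      have h0 : s.length ≠ 0 := fun hz => hsne (List.length_eq_zero_iff.mp hz)
      omega

-- B's signal-major search, summed over the active signals, seen as A's existential.
theorem pvBridge (txt topic cat : List Char) :
    ((pvActive cat).any (fun sig => pvScanSig txt topic sig (txt.length + 1) 0) = true)
    ↔ ∃ t, 0 ≤ t ∧ t ≤ txt.length ∧ topic <+: txt.drop t ∧ pvHitProp txt cat t := by
  rw [List.any_eq_true]
  constructor
  · rintro ⟨s, hs, hb⟩
    rw [pvScanSig_iff txt topic (pvActive_facts cat s hs).1 (txt.length + 1) 0 (by omega)] at hb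
    obtain ⟨i, -, hiocc, t, h1, h2, h3, htop⟩ := hb
    exact ⟨t, Nat.zero_le _, h3, htop, s, hs, i, by omega, h1, hiocc⟩
  · rintro ⟨t, -, htl, htop, s, hs, i, hw1, hw2, hiocc⟩
    refine ⟨s, hs, ?_⟩
    rw [pvScanSig_iff txt topic (pvActive_facts cat s hs).1 (txt.length + 1) 0 (by omega)]
    exact ⟨i, Nat.zero_le _, hiocc, t, hw2, hw1, htl, htop⟩

-- ===== VERDICT (by name: the statement is the Claim_ definition above) =====
theorem has_dangerous_intent_py_spec : Claim_equal_has_dangerous_intent_py := by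
  intro text topic category _
  unfold Spec_has_dangerous_intent_py has_dangerous_intent_py has_dangerous_intent_py_alt
  rw [pvSplit_extraction, pvSplit_creation]
  show pvALoop text.toList topic.toList category.toList (text.toList.length + 2) 0 =
    (if category = "malware" then pvExtractionSignals ++ pvCreationSignals
     else pvExtractionSignals).any
      (fun sig => pvScanSig text.toList topic.toList sig (text.toList.length + 1) 0)
  have hsig : (if category = "malware" then pvExtractionSignals ++ pvCreationSignals
               else pvExtractionSignals) = pvActive category.toList := by
    unfold pvActive
    by_cases hm : category = "malware"
    · rw [if_pos hm, if_pos (by rw [hm])]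
    · rw [if_neg hm, if_neg (fun h => hm (String.toList_inj.mp h))]
  rw [hsig]
  apply Bool.coe_iff_coe.mp
  rw [pvALoop_iff text.toList topic.toList category.toList (text.toList.length + 2) 0 (by omega),
      pvBridge text.toList topic.toList category.toList]
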